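-- pv_equiv track=rewrite | github.com/Mvishal123/DSA | Array/LeftCircularShift.py | first_method
-- ===== SOURCE A (Python) =====
-- def first_method(ls):
--     index = len(ls) - 1
--     temp = ls[index]
--     while index >= -1:
--         replace = ls[index]
--         if not index == len(ls) - 1:
--             ls[index] = temp
--             temp = replace
--
--         index -= 1
--
--     return ls
-- ===== SOURCE B (Python) =====
-- def first_method(ls):
--     temp = ls.pop(0)
--     ls.append(temp)
--     return ls
-- ===== Notes on version B (the rewrite author's own statement) =====
-- stated objective: simpler
-- what changed: Replaces the manual index-walking shift loop (with its negative-index final write) by a single pop(0)/append pair; same in-place mutation of the argument and the same IndexError on an empty list.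
import Mathlib
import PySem

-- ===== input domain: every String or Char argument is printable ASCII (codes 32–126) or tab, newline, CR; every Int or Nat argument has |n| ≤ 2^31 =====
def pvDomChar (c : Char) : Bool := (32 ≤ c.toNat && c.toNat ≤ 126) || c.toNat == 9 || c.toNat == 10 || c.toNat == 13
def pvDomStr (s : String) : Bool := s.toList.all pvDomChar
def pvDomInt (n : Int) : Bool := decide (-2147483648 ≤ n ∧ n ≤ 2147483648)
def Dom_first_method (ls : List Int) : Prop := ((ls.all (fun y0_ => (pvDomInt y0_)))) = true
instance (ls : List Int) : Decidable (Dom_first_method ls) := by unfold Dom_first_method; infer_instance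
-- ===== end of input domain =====

-- B replaces A's manual backward shifting loop by a single pop(0)/append; both mutate the
-- argument list in place in Python (equivalence here is about the returned value).

-- ===== PORT A =====
-- the while loop: counter c encodes index = c - 1 (so c runs len(ls), …, 1, 0; the loop
-- body executes once more at index = -1 and then exits).
def first_method_loop (t : Int) (ls : List Int) (c : Nat) : List Int :=
  match PySem.List.pyGet? ls ((c : Int) - 1) with
  | none => ls  -- IndexError (only reachable for the empty list, excluded by Pre_)
  | some replace =>
    let p := if ((c : Int) - 1) = (ls.length : Int) - 1 then (ls, t)
             else (PySem.List.pySetD ls ((c : Int) - 1) t, replace)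
    match c with
    | 0 => p.1
    | c' + 1 => first_method_loop p.2 p.1 c'

def first_method (ls : List Int) : List Int :=
  match PySem.List.pyGet? ls ((ls.length : Int) - 1) with
  | none => ls  -- IndexError on the empty list; excluded by Pre_
  | some temp => first_method_loop temp ls ls.length

-- ===== PORT B =====
def first_method_alt (ls : List Int) : List Int :=
  match PySem.List.pop? ls 0 with
  | none => ls  -- IndexError on the empty list; excluded by Pre_
  | some (temp, rest) => rest ++ [temp]

-- ===== PRECONDITION & SPEC =====
-- A reads ls[len(ls)-1] first, so it raises IndexError exactly on the empty list (B's pop(0) too).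
def Pre_first_method (ls : List Int) : Prop := ls ≠ []
instance (ls : List Int) : Decidable (Pre_first_method ls) := by unfold Pre_first_method; infer_instance

def pvWitness_first_method : List Int := [1, 2, 3]

def Spec_first_method (ls : List Int) (out : List Int) : Prop := out = first_method_alt ls
instance (ls : List Int) (out : List Int) : Decidable (Spec_first_method ls out) := by unfold Spec_first_method; infer_instance

-- ===== CLAIM (what is proved, stated in full; the proofs are below) =====
def Claim_equal_first_method : Prop := ∀ (ls : List Int), Dom_first_method ls → Pre_first_method ls → Spec_first_method ls (first_method ls)

-- ===== LEMMAS AND PROOFS =====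

-- the final loop iteration (index = -1): write temp into the last slot.
lemma first_method_loop_zero (t : Int) (tl : List Int) (ht : tl ≠ []) :
    first_method_loop t tl 0 = tl.dropLast ++ [t] := by
  obtain ⟨x, xs, rfl⟩ := List.exists_cons_of_ne_nil ht
  rw [first_method_loop]
  simp [PySem.List.pyGet?, PySem.List.pyIdx?, PySem.List.pySetD, PySem.List.pySet?,
    List.set_eq_take_append_cons_drop, List.dropLast_eq_take]

-- consuming pre from the right: each step writes t at the current index and carries the
-- overwritten value as the new temp.
lemma first_method_loop_inv :
    ∀ (pre : List Int) (t : Int) (tl : List Int), pre ≠ [] → tl ≠ [] →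
      first_method_loop t (pre ++ tl) pre.length =
        pre.tail ++ t :: tl.dropLast ++ [pre.headI] := by
  intro pre
  induction pre using List.reverseRecOn with
  | nil => intro t tl h _; exact absurd rfl h
  | append_singleton pre' p ih =>
    intro t tl _ ht
    rw [first_method_loop]
    have hlen : ((pre' ++ [p]) ++ tl).length = pre'.length + 1 + tl.length := by simp; omega
    have hidx : ((((pre' ++ [p]).length : Int)) - 1) = (pre'.length : Int) := by simp
    have hget : PySem.List.pyGet? ((pre' ++ [p]) ++ tl) ((pre'.length : Int)) = some p := by
      rw [PySem.List.pyGet?_natCast]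
      simp [List.append_assoc]
    have hne : ¬ ((pre'.length : Int) = (((pre' ++ [p]) ++ tl).length : Int) - 1) := by
      rw [hlen]
      have : tl.length ≠ 0 := by simpa using ht
      push_cast; omega
    have hset : PySem.List.pySetD ((pre' ++ [p]) ++ tl) ((pre'.length : Int)) t
        = pre' ++ t :: tl := by
      rw [PySem.List.pySetD_natCast]
      simp [List.set_eq_take_append_cons_drop, List.drop_append]
    rw [hidx, hget]
    simp only [hne, if_false]
    have hc : (pre' ++ [p]).length = pre'.length + 1 := by simp
    rw [hc]
    show first_method_loop p (PySem.List.pySetD ((pre' ++ [p]) ++ tl) ((pre'.length : Int)) t) pre'.length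
        = _
    rw [hset]
    rcases List.eq_nil_or_concat' pre' with rfl | ⟨q, rest, hq⟩
    · simp only [List.nil_append, List.length_nil]
      rw [first_method_loop_zero p (t :: tl) (by simp)]
      simp [List.dropLast_cons_of_ne_nil ht]
    · have hpre : pre' ≠ [] := by subst hq; simp
      rw [ih p (t :: tl) hpre (by simp)]
      obtain ⟨a, as, rfl⟩ := List.exists_cons_of_ne_nil hpre
      simp [List.dropLast_cons_of_ne_nil ht]

-- ===== VERDICT (by name: the statement is the Claim_ definition above) =====
theorem first_method_spec : Claim_equal_first_method := by
  intro ls _ hpre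
  unfold Spec_first_method
  obtain ⟨x, xs, rfl⟩ := List.exists_cons_of_ne_nil hpre
  have hg : xs.length < (x :: xs).length := by simp
  have hget : PySem.List.pyGet? (x :: xs) ((xs.length : Nat) : Int)
      = some ((x :: xs).getLast (by simp)) := by
    rw [PySem.List.pyGet?_natCast, List.getElem?_eq_getElem hg]
    congr 1
    rw [List.getLast_eq_getElem]
    simp
  have hget0 : PySem.List.pyGet? (x :: xs) (((x :: xs).length : Int) - 1)
      = some ((x :: xs).getLast (by simp)) := by
    rw [show (((x :: xs).length : Int) - 1) = ((xs.length : Nat) : Int) by simp]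
    exact hget
  have hc : (x :: xs).length = xs.length + 1 := by simp
  have h1 : ((xs.length + 1 : Nat) : Int) - 1 = ((xs.length : Nat) : Int) := by push_cast; ring
  rw [first_method, hget0, hc]
  show first_method_loop ((x :: xs).getLast (by simp)) (x :: xs) (xs.length + 1) = _
  rw [first_method_loop.eq_def, h1, hget]
  simp only [if_pos (show ((xs.length : Nat) : Int) = ((x :: xs).length : Int) - 1 by simp)]
  show first_method_loop ((x :: xs).getLast (by simp)) (x :: xs) xs.length = _
  rcases List.eq_nil_or_concat' xs with rfl | ⟨ys, y, rfl⟩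
  · rw [show ([] : List Int).length = 0 from rfl]
    rw [first_method_loop_zero _ _ (by simp)]
    simp [first_method_alt, PySem.List.pop?, PySem.List.pyIdx?]
  · have hlast : (x :: (ys ++ [y])).getLast (by simp) = y := by
      simp
    have hsplit : x :: (ys ++ [y]) = (x :: ys) ++ [y] := by simp
    have hlen : (ys ++ [y]).length = (x :: ys).length := by simp
    rw [hlast, hlen, hsplit]
    rw [first_method_loop_inv (x :: ys) _ [y] (by simp) (by simp)]
    simp [first_method_alt, PySem.List.pop?, PySem.List.pyIdx?,
      show (0 : Int) ≤ (ys.length : Int) + 1 by positivity]
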